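-- pv_equiv track=rewrite | github.com/spraldev/comp-prog | usaco/silver/the-best-lineup/main.py | try_index
-- ===== SOURCE A (Python) =====
-- def try_index(A, differing_index):
--     """
--     Makes one move: place sorted_A[differing_index] into index `differing_index`.
--     Then computes the 'suffix maxima' sequence from that new arrangement.
--     """
--     N = len(A)
--     sorted_A = sorted(A, reverse=True)
--     newA = A[:]
--
--     # Attempt to remove sorted_A[differing_index] from a position >= differing_index
--     # If not found, remove from anywhere
--     try:
--         i = newA.index(sorted_A[differing_index], differing_index)
--     except ValueError:
--         i = newA.index(sorted_A[differing_index])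
--
--     newA.pop(i)
--     newA.insert(differing_index, sorted_A[differing_index])
--
--     suffix_max = [0] * N
--     suffix_max[-1] = newA[-1]
--     ans = [newA[-1]]
--     for i in range(N - 2, -1, -1):
--         if newA[i] >= suffix_max[i + 1]:
--             suffix_max[i] = newA[i]
--             ans.append(newA[i])
--         else:
--             suffix_max[i] = suffix_max[i + 1]
--
--     ans.reverse()
--     return ans
-- ===== SOURCE B (Python) =====
-- def try_index(A, differing_index):
--     """
--     Place the k-th largest value at position k (preferring to take a copy that
--     already sits at or after k), then keep the lineup's leaders: each cow that
--     sees no strictly taller cow behind her, found with a monotonic stack.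
--     """
--     k = differing_index
--     v = sorted(A)[len(A) - 1 - k]
--
--     tail = A[k:]
--     if v in tail:
--         tail.remove(v)
--         newA = A[:k] + [v] + tail
--     else:
--         head = A[:k + 1]
--         head.remove(v)
--         newA = head + [v] + A[k + 1:]
--
--     stack = []
--     for x in newA:
--         while stack and stack[-1] < x:
--             stack.pop()
--         stack.append(x)
--     return stack
-- ===== Notes on version B (the rewrite author's own statement) =====
-- stated objective: alternative
-- what changed: B picks the k-th largest from an ascending sort, rebuilds the lineup by a slice membership test plus one remove instead of try/except index search with pop/insert, and computes the leaders with a left-to-right monotonic stack instead of the right-to-left suffix_max array loop; Pre_ excludes negative differing_index, where A's value comes from Python's negative-index wraparound into sorted_A and list.index's clamping of a negative start, and B's own indexing raises there.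
-- outside the precondition, e.g. on try_index([1, 2], -1): A returns [2], B raises IndexError; on try_index([3, 1, 2], -2): A returns [3, 1], B raises IndexError
import Mathlib
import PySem

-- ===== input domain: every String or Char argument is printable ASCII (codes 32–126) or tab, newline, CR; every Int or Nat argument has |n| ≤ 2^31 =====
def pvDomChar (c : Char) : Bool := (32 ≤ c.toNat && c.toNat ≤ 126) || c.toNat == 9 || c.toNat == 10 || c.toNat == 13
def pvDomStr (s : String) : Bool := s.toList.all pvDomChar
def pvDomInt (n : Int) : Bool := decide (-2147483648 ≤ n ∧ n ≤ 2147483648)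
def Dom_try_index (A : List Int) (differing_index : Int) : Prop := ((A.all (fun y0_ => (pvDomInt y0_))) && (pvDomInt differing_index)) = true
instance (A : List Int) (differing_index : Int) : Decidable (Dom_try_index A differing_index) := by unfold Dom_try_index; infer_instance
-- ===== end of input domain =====

-- B rebuilds the lineup with a slice membership test plus one remove (instead of
-- try/except index search with pop/insert) and finds the leaders with a left-to-right
-- monotonic stack (instead of the right-to-left suffix_max array loop); objective:
-- alternative, same asymptotic cost. A mutates only a local copy, so no visible side effects.

-- ===== PORT A =====

-- newA.index(v, start): Python normalises a negative/overlarge start exactly like a slice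
-- bound (clampIdx), then searches from there; none = ValueError.
def pyIndexFrom (xs : List Int) (v : Int) (start : Int) : Option Nat :=
  let s : Nat := PySem.List.clampIdx xs.length start
  (PySem.List.index? (xs.drop s) v).map (· + s)

def try_index (A : List Int) (differing_index : Int) : List Int :=
  let N : Nat := A.length
  let sorted_A := PySem.List.sorted A (fun x => x) true
  match PySem.List.pyGet? sorted_A differing_index with
  | none => []          -- IndexError: excluded by Pre_
  | some v =>
    let newA := A       -- A[:]
    -- try: i = newA.index(v, differing_index)  except ValueError: i = newA.index(v)
    let i : Nat :=
      match pyIndexFrom newA v differing_index with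
      | some i => i
      | none => (PySem.List.index? newA v).getD 0   -- v ∈ newA, so the getD default is never used
    match PySem.List.pop? newA (i : Int) with
    | none => []        -- unreachable: i is a valid index
    | some (_, popped) =>
      let newA2 := PySem.List.insert popped differing_index v
      let last := PySem.List.pyGetD newA2 (-1) 0
      let suffix_max := (List.replicate N (0 : Int)).set (N - 1) last  -- suffix_max[-1] = newA[-1]
      let st := (PySem.List.pyRange ((N : Int) - 2) (-1) (-1)).foldl
        (fun (st : List Int × List Int) i =>
          let xi := PySem.List.pyGetD newA2 i 0
          let s1 := PySem.List.pyGetD st.1 (i + 1) 0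
          if s1 ≤ xi then (st.1.set i.toNat xi, st.2 ++ [xi])
          else (st.1.set i.toNat s1, st.2)) (suffix_max, [last])
      st.2.reverse

-- ===== PORT B =====

-- the `while stack and stack[-1] < x: stack.pop()` loop; the Lean stack keeps its top at
-- the head (Python appends at the end), so the port reverses the stack on return
def pvPop (x : Int) : List Int → List Int
  | [] => []
  | y :: t => if y < x then pvPop x t else y :: t

def try_index_alt (A : List Int) (differing_index : Int) : List Int :=
  let k := differing_index
  match PySem.List.pyGet? (PySem.List.sorted A (fun x => x) false) ((A.length : Int) - 1 - k) with
  | none => []          -- IndexError, as in Source B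
  | some v =>
    let tail := PySem.List.slice A (some k) none
    let newA :=
      if tail.contains v then
        PySem.List.slice A none (some k) ++ v :: ((PySem.List.remove? tail v).getD tail)
      else
        let head := PySem.List.slice A none (some (k + 1))
        ((PySem.List.remove? head v).getD head) ++ v :: PySem.List.slice A (some (k + 1)) none
    (newA.foldl (fun stack x => x :: pvPop x stack) []).reverse

-- ===== PRECONDITION & SPEC =====
-- Pre_ excludes differing_index out of [0, len A): for differing_index < -len A or ≥ len A the
-- Python A raises IndexError, and for -len A ≤ differing_index < 0 A's value is an artefact of
-- Python's negative-index wraparound into sorted_A and list.index's clamping of a negative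
-- start — B's own indexing raises IndexError there.
def Pre_try_index (A : List Int) (differing_index : Int) : Prop :=
  0 ≤ differing_index ∧ differing_index < A.length
instance (A : List Int) (differing_index : Int) : Decidable (Pre_try_index A differing_index) := by
  unfold Pre_try_index; infer_instance

def pvWitness_try_index : List Int × Int := ([3, 1, 2, 1], 1)

def Spec_try_index (A : List Int) (differing_index : Int) (out : List Int) : Prop := out = try_index_alt A differing_index
instance (A : List Int) (differing_index : Int) (out : List Int) : Decidable (Spec_try_index A differing_index out) := by unfold Spec_try_index; infer_instance

-- ===== CLAIM (what is proved, stated in full; the proofs are below) =====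
def Claim_equal_try_index : Prop := ∀ (A : List Int) (differing_index : Int), Dom_try_index A differing_index → Pre_try_index A differing_index → Spec_try_index A differing_index (try_index A differing_index)

-- ===== LEMMAS AND PROOFS =====

-- suffix-maxima selection, the common mathematical core of both programs:
-- suf ys = (max of ys, the elements of ys that are >= every element to their right)
def suf : List Int → Int × List Int
  | [] => (0, [])
  | [x] => (x, [x])
  | x :: y :: t =>
    let (m, l) := suf (y :: t)
    if m ≤ x then (x, x :: l) else (m, l)

lemma suf_cons (x y : Int) (t : List Int) :
    suf (x :: y :: t) =
      if (suf (y :: t)).1 ≤ x then (x, x :: (suf (y :: t)).2) else suf (y :: t) := by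
  simp [suf]

lemma suf_le (q : List Int) : ∀ z ∈ (suf q).2, z ≤ (suf q).1 := by
  induction q with
  | nil => simp [suf]
  | cons x t ih =>
    match t with
    | [] => simp [suf]
    | y :: t' =>
      rw [suf_cons]
      by_cases h : (suf (y :: t')).1 ≤ x
      · rw [if_pos h]
        intro z hz
        rcases List.mem_cons.mp hz with rfl | hz
        · exact le_refl z
        · exact le_trans (ih z hz) h
      · rw [if_neg h]
        exact ih

lemma pvPop_all_lt (x : Int) (l : List Int) (h : ∀ y ∈ l, y < x) : pvPop x l = [] := by
  induction l with
  | nil => rfl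
  | cons y t ih =>
    rw [pvPop, if_pos (h y (by simp))]
    exact ih (fun z hz => h z (by simp [hz]))

lemma pvPop_append_ge (x a : Int) (hxa : x ≤ a) (l : List Int) :
    pvPop x (l ++ [a]) = pvPop x l ++ [a] := by
  induction l with
  | nil => simp [pvPop, not_lt.mpr hxa]
  | cons y t ih =>
    by_cases h : y < x
    · simpa [pvPop, h] using ih
    · simp [pvPop, h]

lemma suf_snoc (p : List Int) (x : Int) :
    (p ≠ [] → (suf (p ++ [x])).1 = max (suf p).1 x) ∧
      (suf (p ++ [x])).2.reverse = x :: pvPop x ((suf p).2.reverse) := by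
  induction p with
  | nil => simp [suf, pvPop]
  | cons a q ih =>
    match q with
    | [] =>
      constructor
      · intro _
        rw [show [a] ++ [x] = a :: x :: ([] : List Int) by rfl, suf_cons]
        simp only [suf]
        split_ifs with h <;> simp <;> omega
      · rw [show [a] ++ [x] = a :: x :: ([] : List Int) by rfl, suf_cons]
        simp only [suf]
        by_cases h : x ≤ a
        · rw [if_pos h]
          simp [pvPop, not_lt.mpr h]
        · rw [if_neg h]
          simp [pvPop, lt_of_not_ge h]
    | b :: q' =>
      obtain ⟨ih1, ih2⟩ := ih
      have ih1' := ih1 (by simp)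
      have hGa : (suf (a :: b :: q')).2.reverse =
          if (suf (b :: q')).1 ≤ a then (suf (b :: q')).2.reverse ++ [a]
          else (suf (b :: q')).2.reverse := by
        rw [suf_cons]; split_ifs <;> simp
      have hcons : (a :: b :: q') ++ [x] = a :: ((b :: q') ++ [x]) := by simp
      obtain ⟨c, r, hcr⟩ : ∃ c r, (b :: q') ++ [x] = c :: r := ⟨b, q' ++ [x], by simp⟩
      constructor
      · intro _
        rw [hcons, hcr, suf_cons, ← hcr, suf_cons (x := a) (y := b) (t := q')]
        split_ifs with h1 hba hba
        · rw [ih1'] at h1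
          exact (max_eq_left (le_trans (le_max_right _ _) h1)).symm
        · rw [ih1'] at h1
          exact absurd (le_trans (le_max_left _ _) h1) hba
        · rw [ih1'] at h1 ⊢
          have hax : a ≤ x := by
            by_contra hc
            exact h1 (max_le hba (le_of_not_ge hc))
          rw [max_eq_right (le_trans hba hax), max_eq_right hax]
        · exact ih1'
      · rw [hcons, hcr, suf_cons, ← hcr, hGa]
        by_cases h1 : (suf ((b :: q') ++ [x])).1 ≤ a
        · -- a stays a leader: in particular x ≤ a
          have hxa : x ≤ a := le_trans (by rw [ih1']; exact le_max_right _ _) h1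
          have hba : (suf (b :: q')).1 ≤ a :=
            le_trans (by rw [ih1']; exact le_max_left _ _) h1
          rw [if_pos h1, if_pos hba]
          simp only [List.reverse_cons]
          rw [ih2, pvPop_append_ge x a hxa]
          simp
        · rw [if_neg h1]
          by_cases hba : (suf (b :: q')).1 ≤ a
          · -- a was a leader but x kills it: a < x and everything ≤ a < x
            have hax : a < x := by
              rcases max_cases (suf (b :: q')).1 x with ⟨hm, _⟩ | ⟨hm, hlt⟩
              · exact absurd (by rw [ih1', hm]; exact hba) h1
              · by_contra hc
                exact h1 (by rw [ih1']; rcases le_total (suf (b :: q')).1 x with h | h <;>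
                  simp [max_eq_right h, max_eq_left h] <;> omega)
            rw [if_pos hba, ih2]
            have hall : ∀ y ∈ (suf (b :: q')).2.reverse ++ [a], y < x := by
              intro y hy
              rcases List.mem_append.mp hy with hy | hy
              · exact lt_of_le_of_lt (le_trans (suf_le _ y (List.mem_reverse.mp hy)) hba) hax
              · simp at hy; omega
            have hall' : ∀ y ∈ (suf (b :: q')).2.reverse, y < x := by
              intro y hy; exact hall y (List.mem_append.mpr (Or.inl hy))
            rw [pvPop_all_lt x _ hall, pvPop_all_lt x _ hall']
          · rw [if_neg hba]
            exact ih2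

lemma stack_fold (p : List Int) :
    p.foldl (fun s x => x :: pvPop x s) [] = (suf p).2.reverse := by
  induction p using List.reverseRecOn with
  | nil => simp [suf]
  | append_singleton p x ih =>
    rw [List.foldl_append, List.foldl_cons, List.foldl_nil, ih, (suf_snoc p x).2]

-- descending sort of ints = reverse of the ascending sort (values are their own keys,
-- so the non-increasing rearrangement of the multiset is unique)
lemma sorted_desc_eq_reverse (A : List Int) :
    PySem.List.sorted A (fun x => x) true = (PySem.List.sorted A (fun x => x) false).reverse := by
  apply List.Perm.eq_of_pairwise' (r := fun a b : Int => b ≤ a)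
    (PySem.List.sorted_pairwise_rev A (fun x => x))
    ((List.pairwise_reverse).mpr (PySem.List.sorted_pairwise A (fun x => x)))
  exact (PySem.List.sorted_perm A (fun x => x) true).trans
    ((PySem.List.sorted_perm A (fun x => x) false).symm.trans (List.reverse_perm _).symm)

def stepA (ys : List Int) (st : List Int × List Int) (i : Int) : List Int × List Int :=
  let xi := PySem.List.pyGetD ys i 0
  let s1 := PySem.List.pyGetD st.1 (i + 1) 0
  if s1 ≤ xi then (st.1.set i.toNat xi, st.2 ++ [xi])
  else (st.1.set i.toNat s1, st.2)

lemma loopA (ys : List Int) (hys : 1 ≤ ys.length) (k : Nat) (hk : k ≤ ys.length - 1) :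
    (((PySem.List.pyRange ((ys.length - 1 - k : Nat) : Int) ((ys.length : Int) - 1) 1).foldr
        (fun idx st => stepA ys st idx)
        ((List.replicate ys.length (0 : Int)).set (ys.length - 1) (PySem.List.pyGetD ys (-1) 0),
          [PySem.List.pyGetD ys (-1) 0])).1.length = ys.length) ∧
    (((PySem.List.pyRange ((ys.length - 1 - k : Nat) : Int) ((ys.length : Int) - 1) 1).foldr
        (fun idx st => stepA ys st idx)
        ((List.replicate ys.length (0 : Int)).set (ys.length - 1) (PySem.List.pyGetD ys (-1) 0),
          [PySem.List.pyGetD ys (-1) 0])).1.getD (ys.length - 1 - k) 0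
      = (suf (ys.drop (ys.length - 1 - k))).1) ∧
    (((PySem.List.pyRange ((ys.length - 1 - k : Nat) : Int) ((ys.length : Int) - 1) 1).foldr
        (fun idx st => stepA ys st idx)
        ((List.replicate ys.length (0 : Int)).set (ys.length - 1) (PySem.List.pyGetD ys (-1) 0),
          [PySem.List.pyGetD ys (-1) 0])).2
      = (suf (ys.drop (ys.length - 1 - k))).2.reverse) := by
  induction k with
  | zero =>
    have hnil : PySem.List.pyRange ((ys.length - 1 - 0 : Nat) : Int) ((ys.length : Int) - 1) 1 = [] :=
      PySem.List.pyRange_one_eq_nil (by omega)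
    rw [hnil]
    have hlt : ys.length - 1 < ys.length := by omega
    have hdrop : ys.drop (ys.length - 1) = [ys[ys.length - 1]] := by
      rw [List.drop_eq_getElem_cons hlt, show ys.length - 1 + 1 = ys.length by omega,
        List.drop_length]
    have hlast : PySem.List.pyGetD ys (-1) 0 = ys[ys.length - 1] := by
      simp [PySem.List.pyGetD, PySem.List.pyGet?_neg_one, List.getLast?_eq_getElem?,
        List.getElem?_eq_getElem hlt]
    simp only [List.foldr_nil, Nat.sub_zero, hdrop, hlast, suf]
    refine ⟨by simp, ?_, by simp⟩
    rw [List.getD_eq_getElem?_getD, List.getElem?_set_self (by simpa using hlt)]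
    simp
  | succ k ih =>
    have hk' : k ≤ ys.length - 1 := by omega
    obtain ⟨ih1, ih2, ih3⟩ := ih hk'
    set M := ys.length with hM
    have hi : M - 1 - (k + 1) < M - 1 := by omega
    have hcons : PySem.List.pyRange ((M - 1 - (k + 1) : Nat) : Int) ((M : Int) - 1) 1 =
        ((M - 1 - (k + 1) : Nat) : Int) :: PySem.List.pyRange (((M - 1 - (k + 1) : Nat) : Int) + 1) ((M : Int) - 1) 1 := by
      apply PySem.List.pyRange_one_cons
      omega
    have hsucc : (((M - 1 - (k + 1) : Nat) : Int) + 1) = ((M - 1 - k : Nat) : Int) := by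
      omega
    rw [hcons, hsucc, List.foldr_cons]
    set i : Nat := M - 1 - (k + 1) with hidef
    set st := (PySem.List.pyRange ((M - 1 - k : Nat) : Int) ((M : Int) - 1) 1).foldr
        (fun idx st => stepA ys st idx)
        ((List.replicate M (0 : Int)).set (M - 1) (PySem.List.pyGetD ys (-1) 0),
          [PySem.List.pyGetD ys (-1) 0]) with hst
    have hiM : i < M := by omega
    have hi1 : i + 1 = M - 1 - k := by omega
    have hxi : PySem.List.pyGetD ys (i : Int) 0 = ys[i] := by
      rw [PySem.List.pyGetD_natCast]
      exact List.getD_eq_getElem ys 0 hiM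
    have hs1 : PySem.List.pyGetD st.1 ((i : Int) + 1) 0 = (suf (ys.drop (i + 1))).1 := by
      rw [show ((i : Int) + 1) = ((i + 1 : Nat) : Int) by push_cast; ring, PySem.List.pyGetD_natCast, hi1]
      exact ih2
    have hdropi : ys.drop i = ys[i] :: ys.drop (i + 1) := List.drop_eq_getElem_cons hiM
    obtain ⟨y, t, hyt⟩ : ∃ y t, ys.drop (i + 1) = y :: t := by
      cases h : ys.drop (i + 1) with
      | nil => exfalso; have := List.length_drop (l := ys) (i := i + 1); rw [h] at this; simp at this; omega
      | cons y t => exact ⟨y, t, rfl⟩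
    have hsufi : suf (ys.drop i) =
        if (suf (ys.drop (i + 1))).1 ≤ ys[i] then (ys[i], ys[i] :: (suf (ys.drop (i + 1))).2)
        else suf (ys.drop (i + 1)) := by
      rw [hdropi, hyt, suf_cons, ← hyt]
    show ((stepA ys st (i : Int)).1.length = M) ∧
      ((stepA ys st (i : Int)).1.getD i 0 = (suf (ys.drop i)).1) ∧
      ((stepA ys st (i : Int)).2 = (suf (ys.drop i)).2.reverse)
    rw [← hi1] at ih2 ih3
    have hitoNat : ((i : Int)).toNat = i := by omega
    have hlen : st.1.length = M := ih1
    by_cases hle : (suf (ys.drop (i + 1))).1 ≤ ys[i]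
    · simp only [stepA, hxi, hs1, if_pos hle, hitoNat]
      refine ⟨by simpa using hlen, ?_, ?_⟩
      · rw [List.getD_eq_getElem?_getD, List.getElem?_set_self (by omega), hsufi, if_pos hle]; rfl
      · rw [ih3, hsufi, if_pos hle]
        simp
    · simp only [stepA, hxi, hs1, if_neg hle, hitoNat]
      refine ⟨by simpa using hlen, ?_, ?_⟩
      · rw [List.getD_eq_getElem?_getD, List.getElem?_set_self (by omega), hsufi, if_neg hle]; rfl
      · rw [ih3, hsufi, if_neg hle]

lemma loopA_final (ys : List Int) (hys : 1 ≤ ys.length) :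
    (((PySem.List.pyRange ((ys.length : Int) - 2) (-1) (-1)).foldl (fun st idx => stepA ys st idx)
        ((List.replicate ys.length (0 : Int)).set (ys.length - 1) (PySem.List.pyGetD ys (-1) 0),
          [PySem.List.pyGetD ys (-1) 0])).2).reverse = (suf ys).2 := by
  rw [PySem.List.pyRange_neg_one_eq_reverse, List.foldl_reverse]
  have h0 : ((-1 : Int) + 1) = ((ys.length - 1 - (ys.length - 1) : Nat) : Int) := by push_cast; omega
  have h1 : ((ys.length : Int) - 2 + 1) = (ys.length : Int) - 1 := by ring
  rw [h0, h1]
  have := (loopA ys hys (ys.length - 1) le_rfl).2.2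
  rw [this, show ys.length - 1 - (ys.length - 1) = 0 by omega, List.drop_zero, List.reverse_reverse]

lemma getElem_idx_congr {α : Type} (l : List α) (i j : Nat) (hi : i < l.length)
    (hj : j < l.length) (h : i = j) : l[i] = l[j] := by subst h; rfl

lemma eraseIdx_concat (L s : List Int) (v : Int) : (L ++ v :: s).eraseIdx L.length = L ++ s := by
  induction L with
  | nil => rfl
  | cons a t ih => simpa using ih

-- ===== VERDICT (by name: the statement is the Claim_ definition above) =====
theorem try_index_spec : Claim_equal_try_index := by
  intro A di hdom hpre
  unfold Spec_try_index
  obtain ⟨hd0, hdN⟩ := hpre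
  obtain ⟨k, rfl⟩ : ∃ k : Nat, di = (k : Int) := ⟨di.toNat, (Int.toNat_of_nonneg hd0).symm⟩
  have hkN : k < A.length := by exact_mod_cast hdN
  have hlenF : (PySem.List.sorted A (fun x => x) false).length = A.length :=
    PySem.List.length_sorted A (fun x => x) false
  set v : Int := (PySem.List.sorted A (fun x => x) false)[A.length - 1 - k]'(by omega) with hvdef
  have hvA : PySem.List.pyGet? (PySem.List.sorted A (fun x => x) true) ((k : Nat) : Int) = some v := by
    rw [sorted_desc_eq_reverse]
    rw [PySem.List.pyGet?_ofNat _ k (by simpa [hlenF] using hkN)]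
    rw [hvdef]
    congr 1
    rw [List.getElem_reverse]
    exact getElem_idx_congr _ _ _ (by omega) (by omega) (by omega)
  have hvB : PySem.List.pyGet? (PySem.List.sorted A (fun x => x) false)
      ((A.length : Int) - 1 - ((k : Nat) : Int)) = some v := by
    rw [show ((A.length : Int) - 1 - ((k : Nat) : Int)) = ((A.length - 1 - k : Nat) : Int) by omega]
    exact PySem.List.pyGet?_ofNat _ _ (by omega)
  have hvmem : v ∈ A := by
    rw [hvdef, ← PySem.List.mem_sorted A (fun x => x) false]
    exact List.getElem_mem _
  have hclamp : PySem.List.clampIdx A.length ((k : Nat) : Int) = k := by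
    rw [PySem.List.clampIdx_natCast]; omega
  by_cases hmem : v ∈ A.drop k
  · -- sorted_A[k] still occurs at or after position k
    obtain ⟨j, hj⟩ := Option.isSome_iff_exists.mp ((PySem.List.index?_isSome_iff _ _).mpr hmem)
    obtain ⟨p, s, hps, hpl, hvp⟩ := (PySem.List.index?_eq_some_iff _ _ _).mp hj
    have hlens : A.length - k = j + 1 + s.length := by
      have := congrArg List.length hps; simp [hpl] at this; omega
    have hjlt : j + k < A.length := by omega
    have htk : (A.take k).length = k := by simp; omega
    have hAsplit : A = (A.take k ++ p) ++ v :: s := by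
      conv_lhs => rw [← List.take_append_drop k A, hps]
      simp
    have hpif : pyIndexFrom A v ((k : Nat) : Int) = some (j + k) := by
      rw [pyIndexFrom]
      simp only [hclamp, hj, Option.map_some]
    have herase : A.eraseIdx (j + k) = A.take k ++ (p ++ s) := by
      conv_lhs => rw [hAsplit, show j + k = (A.take k ++ p).length by simp [htk, hpl]; omega]
      rw [eraseIdx_concat]
      simp
    have hins : PySem.List.insert (A.take k ++ (p ++ s)) ((k : Nat) : Int) v
        = A.take k ++ v :: (p ++ s) := by
      rw [PySem.List.insert_natCast _ k _ (by simp; omega)]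
      rw [List.take_append, List.drop_append, htk, Nat.sub_self, List.take_zero, List.drop_zero,
        List.take_of_length_le (le_of_eq htk), List.drop_eq_nil_of_le (le_of_eq htk),
        List.append_nil, List.nil_append]
    set W : List Int := A.take k ++ v :: (p ++ s) with hW
    have hWlen : W.length = A.length := by
      rw [hW]; simp [htk, hpl]; omega
    have hA : try_index A ((k : Nat) : Int) = (suf W).2 := by
      rw [try_index]
      simp only [hvA, hpif, PySem.List.pop?_natCast A (j + k) hjlt, herase, hins]
      have := loopA_final W (by omega)
      rw [← this, hWlen]
      rfl
    have hrem : PySem.List.remove? (A.drop k) v = some (p ++ s) := by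
      rw [PySem.List.remove?_eq_some_erase _ _ hmem, hps,
        List.erase_append_right _ hvp, List.erase_cons_head]
    have hB : try_index_alt A ((k : Nat) : Int) = (suf W).2 := by
      rw [try_index_alt]
      simp only [hvB, PySem.List.slice_from_natCast, PySem.List.slice_to_natCast,
        List.contains_iff_mem.mpr hmem, if_true, hrem, Option.getD_some]
      rw [stack_fold, List.reverse_reverse]
    rw [hA, hB]
  · -- the k-th largest only occurs before position k
    have hnone : PySem.List.index? (A.drop k) v = none :=
      (PySem.List.index?_eq_none_iff _ _).mpr hmem
    obtain ⟨i, hi⟩ := Option.isSome_iff_exists.mp ((PySem.List.index?_isSome_iff _ _).mpr hvmem)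
    obtain ⟨p, s, hps, hpl, hvp⟩ := (PySem.List.index?_eq_some_iff _ _ _).mp hi
    have hik : i < k := by
      by_contra hc
      rw [not_lt] at hc
      apply hmem
      rw [hps, List.drop_append, hpl, show k - i = 0 by omega, List.drop_zero]
      simp
    have hlens : A.length = i + 1 + s.length := by
      have := congrArg List.length hps; simp [hpl] at this; omega
    have hpif : pyIndexFrom A v ((k : Nat) : Int) = none := by
      rw [pyIndexFrom]
      simp only [hclamp, hnone, Option.map_none]
    have hiA : (PySem.List.index? A v).getD 0 = i := by rw [hi]; rfl
    have hilt : i < A.length := by omega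
    have herase : A.eraseIdx i = p ++ s := by
      conv_lhs => rw [hps, ← hpl]
      exact eraseIdx_concat p s v
    have hins : PySem.List.insert (p ++ s) ((k : Nat) : Int) v
        = (p ++ List.take (k - i) s) ++ v :: List.drop (k - i) s := by
      rw [PySem.List.insert_natCast _ k _ (by simp [hpl]; omega)]
      rw [List.take_append, List.drop_append, hpl,
        List.take_of_length_le (by omega : p.length ≤ k),
        List.drop_eq_nil_of_le (by omega : p.length ≤ k), List.nil_append]
    set W : List Int := (p ++ List.take (k - i) s) ++ v :: List.drop (k - i) s with hW
    have hWlen : W.length = A.length := by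
      rw [hW]; simp [hpl]; omega
    have hA : try_index A ((k : Nat) : Int) = (suf W).2 := by
      rw [try_index]
      simp only [hvA, hpif, hiA, PySem.List.pop?_natCast A i hilt, herase, hins]
      have := loopA_final W (by omega)
      rw [← this, hWlen]
      rfl
    have hcontf : (A.drop k).contains v = false := by
      simp [hmem]
    have hhead : PySem.List.slice A none (some (((k : Nat) : Int) + 1)) = A.take (k + 1) := by
      rw [show (((k : Nat) : Int) + 1) = ((k + 1 : Nat) : Int) by push_cast; ring]
      exact PySem.List.slice_to_natCast A (k + 1)
    have htail2 : PySem.List.slice A (some (((k : Nat) : Int) + 1)) none = A.drop (k + 1) := by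
      rw [show (((k : Nat) : Int) + 1) = ((k + 1 : Nat) : Int) by push_cast; ring]
      exact PySem.List.slice_from_natCast A (k + 1)
    have htake : A.take (k + 1) = p ++ v :: List.take (k - i) s := by
      rw [hps, List.take_append, hpl, List.take_of_length_le (by omega : p.length ≤ k + 1),
        show k + 1 - i = (k - i) + 1 by omega, List.take_succ_cons]
    have hdrop : A.drop (k + 1) = List.drop (k - i) s := by
      rw [hps, List.drop_append, hpl, List.drop_eq_nil_of_le (by omega : p.length ≤ k + 1),
        show k + 1 - i = (k - i) + 1 by omega, List.drop_succ_cons, List.nil_append]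
    have hvhead : v ∈ A.take (k + 1) := by rw [htake]; simp
    have hrem : PySem.List.remove? (A.take (k + 1)) v = some (p ++ List.take (k - i) s) := by
      rw [PySem.List.remove?_eq_some_erase _ _ hvhead, htake,
        List.erase_append_right _ hvp, List.erase_cons_head]
    have hB : try_index_alt A ((k : Nat) : Int) = (suf W).2 := by
      rw [try_index_alt]
      simp only [hvB, PySem.List.slice_from_natCast, hcontf, Bool.false_eq_true, if_false,
        hhead, htail2, hrem, Option.getD_some, hdrop]
      rw [stack_fold, List.reverse_reverse]
    rw [hA, hB]
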